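-- pv_equiv track=rewrite | github.com/khanhlinh-jnf/Hashiwokakero | make_conditions.py | find_set_edges_of_island
-- ===== SOURCE A (Python) =====
-- def find_set_edges_of_island(island, connections):
--     res = {}
--     for point in island:
--         res[point] = []
--         for connection in connections:
--             if point in connection:
--                 res[point].append(connection)
--     return res
-- ===== SOURCE B (Python) =====
-- def find_set_edges_of_island(island, connections):
--     index = {}
--     for connection in connections:
--         a, b = connection
--         index.setdefault(a, []).append(connection)
--         if b != a:
--             index.setdefault(b, []).append(connection)
--     return {point: index.get(point, []) for point in island}
-- ===== Notes on version B (the rewrite author's own statement) =====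
-- stated objective: faster
-- what changed: B builds an endpoint-to-connections index dict in one pass over connections and then answers each island point with a single lookup, instead of A's rescan of all connections for every island point.
import Mathlib
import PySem

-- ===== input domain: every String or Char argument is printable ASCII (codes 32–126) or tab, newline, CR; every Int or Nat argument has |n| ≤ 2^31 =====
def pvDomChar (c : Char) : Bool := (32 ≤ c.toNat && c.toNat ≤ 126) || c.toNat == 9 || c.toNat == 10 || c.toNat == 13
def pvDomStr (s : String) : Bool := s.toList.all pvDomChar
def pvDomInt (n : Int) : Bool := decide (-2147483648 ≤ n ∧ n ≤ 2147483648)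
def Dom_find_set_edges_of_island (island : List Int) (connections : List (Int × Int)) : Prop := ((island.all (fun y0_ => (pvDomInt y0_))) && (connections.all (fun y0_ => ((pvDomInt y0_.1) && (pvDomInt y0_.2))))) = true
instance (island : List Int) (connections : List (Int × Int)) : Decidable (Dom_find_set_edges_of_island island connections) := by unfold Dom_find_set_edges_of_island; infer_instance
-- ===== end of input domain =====

-- B replaces A's rescan of all connections per island point by a one-pass endpoint→connections
-- index dict followed by a single lookup per point (objective: faster, O(I+C) vs O(I*C)).

-- ===== PORT A =====
-- res[point] = []; inner scan over connections appending each connection touching point.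
def find_set_edges_of_island (island : List Int) (connections : List (Int × Int)) : List (Int × List (Int × Int)) :=
  (island.foldl
    (fun res point =>
      connections.foldl
        (fun res connection =>
          if point = connection.1 ∨ point = connection.2 then
            res.modify point [] (· ++ [connection])
          else res)
        (res.insert point ([] : List (Int × Int))))
    PySem.Dict.empty).items

-- ===== PORT B =====
-- one pass: index.setdefault(endpoint, []).append(connection); then dict comprehension of lookups.
def pvIndexStep (d : PySem.Dict Int (List (Int × Int))) (c : Int × Int) : PySem.Dict Int (List (Int × Int)) :=
  let d1 := d.modify c.1 [] (· ++ [c])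
  if c.2 ≠ c.1 then d1.modify c.2 [] (· ++ [c]) else d1

def find_set_edges_of_island_alt (island : List Int) (connections : List (Int × Int)) : List (Int × List (Int × Int)) :=
  let index : PySem.Dict Int (List (Int × Int)) := connections.foldl pvIndexStep PySem.Dict.empty
  (island.foldl (fun res point => res.insert point (index.getD point [])) PySem.Dict.empty).items

-- ===== PRECONDITION & SPEC =====
def Spec_find_set_edges_of_island (island : List Int) (connections : List (Int × Int)) (out : List (Int × List (Int × Int))) : Prop := out = find_set_edges_of_island_alt island connections
instance (island : List Int) (connections : List (Int × Int)) (out : List (Int × List (Int × Int))) : Decidable (Spec_find_set_edges_of_island island connections out) := by unfold Spec_find_set_edges_of_island; infer_instance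

-- ===== CLAIM (what is proved, stated in full; the proofs are below) =====
def Claim_equal_find_set_edges_of_island : Prop := ∀ (island : List Int) (connections : List (Int × Int)), Dom_find_set_edges_of_island island connections → Spec_find_set_edges_of_island island connections (find_set_edges_of_island island connections)

-- ===== LEMMAS AND PROOFS =====

-- A's inner scan over `cs`, started at a dict whose entry at `p` is `l`, just replaces that
-- entry by `l` followed by the connections touching `p`.
theorem pv_innerA (p : Int) (cs : List (Int × Int))
    (d : PySem.Dict Int (List (Int × Int))) (l : List (Int × Int)) :
    cs.foldl
      (fun res connection =>
        if p = connection.1 ∨ p = connection.2 then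
          res.modify p [] (· ++ [connection])
        else res)
      (d.insert p l)
    = d.insert p (l ++ cs.filter (fun c => decide (p = c.1 ∨ p = c.2))) := by
  induction cs generalizing l with
  | nil => simp
  | cons c cs ih =>
    by_cases h : p = c.1 ∨ p = c.2
    · have h1 : (d.insert p l).modify p [] (· ++ [c]) = d.insert p (l ++ [c]) := by
        rw [PySem.Dict.modify, PySem.Dict.getD_insert_self, PySem.Dict.insert_insert_self]
      simp only [List.foldl_cons, if_pos h, h1, ih, List.filter_cons, decide_eq_true h]
      simp
    · simp only [List.foldl_cons, if_neg h, List.filter_cons, ih]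
      simp [h]

-- B's index, looked up at `p`, yields exactly the connections touching `p`, in order.
theorem pv_index_getD (p : Int) (cs : List (Int × Int))
    (d : PySem.Dict Int (List (Int × Int))) :
    (cs.foldl pvIndexStep d).getD p []
    = d.getD p [] ++ cs.filter (fun c => decide (p = c.1 ∨ p = c.2)) := by
  induction cs generalizing d with
  | nil => simp
  | cons c cs ih =>
    simp only [List.foldl_cons, ih, List.filter_cons]
    have hstep : (pvIndexStep d c).getD p []
        = d.getD p [] ++ (if p = c.1 ∨ p = c.2 then [c] else []) := by
      unfold pvIndexStep
      by_cases h2 : c.2 = c.1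
      · simp only [h2, ne_eq, not_true_eq_false, if_false, PySem.Dict.getD_modify]
        split_ifs with h <;> simp_all
      · simp only [ne_eq, h2, not_false_eq_true, if_true, PySem.Dict.getD_modify]
        split_ifs with ha hb <;> simp_all
    rw [hstep]
    by_cases h : p = c.1 ∨ p = c.2 <;> simp [h]

-- ===== VERDICT (by name: the statement is the Claim_ definition above) =====
theorem find_set_edges_of_island_spec : Claim_equal_find_set_edges_of_island := by
  intro island connections _
  unfold Spec_find_set_edges_of_island find_set_edges_of_island find_set_edges_of_island_alt
  have hf :
      (fun (res : PySem.Dict Int (List (Int × Int))) (point : Int) =>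
        connections.foldl
          (fun res connection =>
            if point = connection.1 ∨ point = connection.2 then
              res.modify point [] (· ++ [connection])
            else res)
          (res.insert point ([] : List (Int × Int))))
      = (fun (res : PySem.Dict Int (List (Int × Int))) (point : Int) =>
          res.insert point ((connections.foldl pvIndexStep PySem.Dict.empty).getD point [])) := by
    funext res point
    rw [pv_innerA, pv_index_getD]
    simp
  rw [hf]
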